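-- pv_equiv track=rewrite | github.com/sorongosdev/GuitarApp | app/src/main/python/example.py | find_matching_chord
-- ===== SOURCE A (Python) =====
-- def find_matching_chord(chord_matching_scores_list):
--     best_chord_list = []
--     chord_frequency = {}  # 이전에 선택된 코드의 빈도를 저장할 딕셔너리
--
--     for scores in chord_matching_scores_list:
--         if not isinstance(scores, dict):
--             best_chord_list.append('null')
--             continue  # 다음 scores로 넘어감
--
--         max_score = max(scores.values())  # 현재 딕셔너리에서 가장 높은 점수를 찾음
--         candidates = [chord for chord, score in scores.items() if score == max_score]  # 동점인 코드를 모두 찾음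
--
--         if len(candidates) > 1:  # 동점인 코드가 여러 개인 경우
--             # 이전에 가장 많이 선택된 코드를 찾거나, 동점인 경우 첫 번째 코드를 선택
--             best_chord = sorted(candidates, key=lambda x: chord_frequency.get(x, 0), reverse=True)[0]
--         else:
--             best_chord = candidates[0]  # 동점인 코드가 하나만 있는 경우, 그 코드를 선택
--
--         # 선택된 코드의 빈도를 업데이트
--         if best_chord in chord_frequency:
--             chord_frequency[best_chord] += 1
--         else:
--             chord_frequency[best_chord] = 1
--
--         best_chord_list.append(best_chord)
--
--     return best_chord_list
-- ===== SOURCE B (Python) =====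
-- def find_matching_chord(chord_matching_scores_list):
--     best_chord_list = []
--     chord_frequency = {}
--
--     for scores in chord_matching_scores_list:
--         if not isinstance(scores, dict):
--             best_chord_list.append('null')
--             continue
--
--         # single argmax over the items: highest score, then highest prior
--         # frequency, then first insertion order (max keeps the first maximum)
--         best_chord = max(scores.items(),
--                          key=lambda kv: (kv[1], chord_frequency.get(kv[0], 0)))[0]
--
--         chord_frequency[best_chord] = chord_frequency.get(best_chord, 0) + 1
--         best_chord_list.append(best_chord)
--
--     return best_chord_list
-- ===== Notes on version B (the rewrite author's own statement) =====
-- stated objective: simpler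
-- what changed: The three-phase selection per frame (max over values, comprehension collecting tied candidates, stable reverse sort by prior frequency) is replaced by one argmax over the dict items with the lexicographic key (score, prior frequency), which picks the same winner because max keeps the first maximal element; the frequency update becomes a single get-based insert.
import Mathlib
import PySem

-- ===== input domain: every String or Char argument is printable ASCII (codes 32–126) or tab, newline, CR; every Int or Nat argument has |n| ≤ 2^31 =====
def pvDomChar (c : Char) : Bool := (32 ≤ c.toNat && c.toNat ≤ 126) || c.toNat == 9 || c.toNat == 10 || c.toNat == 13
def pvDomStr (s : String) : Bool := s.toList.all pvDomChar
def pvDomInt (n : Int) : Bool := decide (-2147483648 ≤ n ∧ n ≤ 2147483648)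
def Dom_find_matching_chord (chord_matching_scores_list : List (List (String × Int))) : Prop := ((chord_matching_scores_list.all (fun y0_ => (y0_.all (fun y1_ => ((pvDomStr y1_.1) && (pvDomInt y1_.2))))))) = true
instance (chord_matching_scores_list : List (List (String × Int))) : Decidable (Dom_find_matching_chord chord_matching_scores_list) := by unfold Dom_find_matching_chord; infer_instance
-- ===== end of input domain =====

-- B replaces A's per-frame max/comprehension/stable-reverse-sort selection by a single
-- lexicographic argmax over the dict items (objective: simpler).
-- Under the type convention every element of the list IS a dict, so A's isinstance
-- branch appending 'null' is unreachable and has no counterpart in the port.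

-- ===== PORT A =====
-- the body of A's for-loop: state = (best_chord_list, chord_frequency)
def pvStepA (st : List String × PySem.Dict String Int) (scores : List (String × Int)) :
    List String × PySem.Dict String Int :=
  let d := PySem.Dict.ofList scores
  match PySem.List.max? d.values (fun v => v) with   -- max(scores.values()); none = ValueError, excluded by Pre_
  | none => (st.1 ++ ["null"], st.2)
  | some max_score =>
    let candidates := (d.items.filter (fun kv => kv.2 == max_score)).map (fun kv => kv.1)
    let best_chord :=
      if 1 < candidates.length then
        (PySem.List.sorted candidates (fun x => st.2.getD x 0) true).headD "null"
      else candidates.headD "null"   -- candidates[0]; candidates is nonempty here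
    let freq := if st.2.contains best_chord then st.2.modify best_chord 0 (· + 1)
                else st.2.insert best_chord 1
    (st.1 ++ [best_chord], freq)

def find_matching_chord (chord_matching_scores_list : List (List (String × Int))) : List String :=
  (chord_matching_scores_list.foldl pvStepA ([], PySem.Dict.empty)).1

-- ===== PORT B =====
-- the body of B's for-loop
def pvStepB (st : List String × PySem.Dict String Int) (scores : List (String × Int)) :
    List String × PySem.Dict String Int :=
  let d := PySem.Dict.ofList scores
  match PySem.List.max2? d.items (fun kv => kv.2) (fun kv => st.2.getD kv.1 0) with
  | none => (st.1 ++ ["null"], st.2)   -- max() on an empty dict: ValueError, excluded by Pre_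
  | some kv =>
    (st.1 ++ [kv.1], st.2.insert kv.1 (st.2.getD kv.1 0 + 1))

def find_matching_chord_alt (chord_matching_scores_list : List (List (String × Int))) : List String :=
  (chord_matching_scores_list.foldl pvStepB ([], PySem.Dict.empty)).1

-- ===== PRECONDITION & SPEC =====
-- Pre_ excludes exactly the inputs containing an empty frame, on which Python's
-- max(scores.values()) raises ValueError (in A and in B alike).
def Pre_find_matching_chord (chord_matching_scores_list : List (List (String × Int))) : Prop :=
  ∀ scores ∈ chord_matching_scores_list, scores ≠ []
instance (chord_matching_scores_list : List (List (String × Int))) : Decidable (Pre_find_matching_chord chord_matching_scores_list) := by unfold Pre_find_matching_chord; infer_instance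

def pvWitness_find_matching_chord : (List (List (String × Int))) :=
  [[("C", 3), ("D", 3)], [("D", 2), ("C", 2)], [("E", 1)]]

def Spec_find_matching_chord (chord_matching_scores_list : List (List (String × Int))) (out : List String) : Prop := out = find_matching_chord_alt chord_matching_scores_list
instance (chord_matching_scores_list : List (List (String × Int))) (out : List String) : Decidable (Spec_find_matching_chord chord_matching_scores_list out) := by unfold Spec_find_matching_chord; infer_instance

-- ===== CLAIM (what is proved, stated in full; the proofs are below) =====
def Claim_equal_find_matching_chord : Prop := ∀ (chord_matching_scores_list : List (List (String × Int))), Dom_find_matching_chord chord_matching_scores_list → Pre_find_matching_chord chord_matching_scores_list → Spec_find_matching_chord chord_matching_scores_list (find_matching_chord chord_matching_scores_list)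

-- ===== LEMMAS AND PROOFS =====

-- getD at an absent key is the default
theorem pv_getD_of_not_contains (d : PySem.Dict String Int) (k : String)
    (h : d.contains k = false) : d.getD k 0 = 0 := by
  simp only [PySem.Dict.contains] at h
  have hf : List.find? (fun p => p.1 == k) d.items = none := by
    rw [List.find?_eq_none]
    intro p hp hpk
    have : d.items.any (fun p => p.1 == k) = true := List.any_eq_true.mpr ⟨p, hp, hpk⟩
    rw [this] at h
    simp at h
  simp [PySem.Dict.getD, PySem.Dict.get?, hf]

-- A's two-branch frequency update is B's single get-based insert
theorem pv_freq_update (d : PySem.Dict String Int) (k : String) :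
    (if d.contains k then d.modify k 0 (· + 1) else d.insert k 1)
      = d.insert k (d.getD k 0 + 1) := by
  by_cases h : d.contains k = true
  · simp [h, PySem.Dict.modify]
  · have h' : d.contains k = false := by simpa using h
    simp [h', pv_getD_of_not_contains d k h']

-- snoc laws for the running maxima
theorem pv_max?_snoc {α κ : Type} [LT κ] [DecidableLT κ] (xs : List α) (x : α) (key : α → κ) :
    PySem.List.max? (xs ++ [x]) key =
      match PySem.List.max? xs key with
      | none => some x
      | some m => some (if key m < key x then x else m) := by
  have h : PySem.List.max? (xs ++ [x]) key =
      (fun acc y => match acc with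
        | none => some y
        | some m => if key m < key y then some y else some m) (PySem.List.max? xs key) x := by
    unfold PySem.List.max?
    rw [List.foldl_append, List.foldl_cons, List.foldl_nil]
    rfl
  rw [h]
  cases PySem.List.max? xs key
  · rfl
  · dsimp only
    split <;> rfl

theorem pv_max2?_snoc {α : Type} (xs : List α) (x : α) (k1 k2 : α → Int) :
    PySem.List.max2? (xs ++ [x]) k1 k2 =
      match PySem.List.max2? xs k1 k2 with
      | none => some x
      | some m => some (if (decide (k1 m < k1 x) || (!decide (k1 x < k1 m) && decide (k2 m < k2 x))) then x else m) := by
  have h : PySem.List.max2? (xs ++ [x]) k1 k2 =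
      (fun acc y => match acc with
        | none => some y
        | some m => if (decide (k1 m < k1 y) || (!decide (k1 y < k1 m) && decide (k2 m < k2 y))) = true then some y else some m)
        (PySem.List.max2? xs k1 k2) x := by
    unfold PySem.List.max2?
    rw [List.foldl_append, List.foldl_cons, List.foldl_nil]
    rfl
  rw [h]
  cases PySem.List.max2? xs k1 k2
  · rfl
  · dsimp only
    split <;> rfl

-- max over a mapped list is the mapped max over the composed key
theorem pv_max?_map {α β : Type} (l : List α) (f : α → β) (k : β → Int) :
    PySem.List.max? (l.map f) k = Option.map f (PySem.List.max? l (fun a => k (f a))) := by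
  induction l using List.reverseRecOn with
  | nil => rfl
  | append_singleton xs x ih =>
    rw [List.map_append, List.map_cons, List.map_nil, pv_max?_snoc, pv_max?_snoc, ih]
    cases PySem.List.max? xs (fun a => k (f a))
    · rfl
    · dsimp only [Option.map]
      rw [apply_ite f]

-- THE KEY LEMMA: the lexicographic first-argmax over (k1, k2) is exactly
-- "first k2-argmax among the elements whose k1 equals the k1-maximum M".
theorem pv_max2?_char {α : Type} (xs : List α) (k1 k2 : α → Int) (M : Int)
    (hM : PySem.List.max? (xs.map k1) (fun v => v) = some M) :
    ∃ m, PySem.List.max2? xs k1 k2 = some m ∧ k1 m = M ∧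
      PySem.List.max? (xs.filter (fun x => k1 x == M)) k2 = some m := by
  induction xs using List.reverseRecOn generalizing M with
  | nil => simp [PySem.List.max?] at hM
  | append_singleton xs x ih =>
    rw [List.map_append, List.map_cons, List.map_nil, pv_max?_snoc] at hM
    rcases h0 : PySem.List.max? (xs.map k1) (fun v => v) with _ | M0
    · -- xs has no k1-maximum, i.e. xs = []
      have hxs : xs = [] := by
        have := (PySem.List.max?_eq_none_iff (xs.map k1) (fun v => v)).mp h0
        simpa using this
      subst hxs
      rw [h0] at hM
      simp at hM
      subst hM
      exact ⟨x, by simp [PySem.List.max2?], rfl, by simp [PySem.List.max?]⟩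
    · rw [h0] at hM
      simp at hM
      have hmax0 : ∀ y ∈ xs, k1 y ≤ M0 := by
        intro y hy
        have := PySem.List.max?_isMax h0 (k1 y) (List.mem_map.mpr ⟨y, hy, rfl⟩)
        simpa using this
      obtain ⟨m, hm2, hmk, hmf⟩ := ih M0 h0
      by_cases hlt : M0 < k1 x
      · -- new strict maximum: the filtered list collapses to [x]
        have hMx : M = k1 x := by rw [← hM]; simp [hlt]
        subst hMx
        have hfil : xs.filter (fun y => k1 y == k1 x) = [] := by
          rw [List.filter_eq_nil_iff]
          intro y hy
          have := hmax0 y hy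
          simp only [beq_iff_eq]
          omega
        refine ⟨x, ?_, rfl, ?_⟩
        · rw [pv_max2?_snoc, hm2]
          simp [hmk, hlt]
        · rw [List.filter_append, hfil]
          simp [PySem.List.max?]
      · -- maximum value unchanged
        have hMM : M = M0 := by rw [← hM]; simp [hlt]
        subst hMM
        by_cases heq : k1 x = M
        · -- a new tied candidate: compare second keys
          have hfil : (xs ++ [x]).filter (fun y => k1 y == M) =
              xs.filter (fun y => k1 y == M) ++ [x] := by
            rw [List.filter_append]; simp [heq]
          refine ⟨if k2 m < k2 x then x else m, ?_, ?_, ?_⟩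
          · rw [pv_max2?_snoc, hm2]
            have : ¬ (k1 m < k1 x) := by omega
            have h2 : ¬ (k1 x < k1 m) := by omega
            simp [this, h2]
          · split <;> simp [heq, hmk]
          · rw [hfil, pv_max?_snoc, hmf]
        · -- strictly smaller: nothing changes
          have hlt' : k1 x < M := by omega
          have hfil : (xs ++ [x]).filter (fun y => k1 y == M) =
              xs.filter (fun y => k1 y == M) := by
            rw [List.filter_append]
            simp [heq]
          refine ⟨m, ?_, hmk, by rw [hfil]; exact hmf⟩
          rw [pv_max2?_snoc, hm2]
          have h1 : ¬ (k1 m < k1 x) := by omega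
          have h2 : k1 x < k1 m := by omega
          simp [h1, h2]

-- head of Python's stable reverse sort = first element attaining the maximal key
theorem pv_head_sorted_rev (xs : List String) (key : String → Int) (m : String) (dflt : String)
    (h : PySem.List.max? xs key = some m) :
    (PySem.List.sorted xs key true).headD dflt = m := by
  induction xs using List.reverseRecOn generalizing m with
  | nil => simp [PySem.List.max?] at h
  | append_singleton xs x ih =>
    rw [pv_max?_snoc] at h
    rcases h0 : PySem.List.max? xs key with _ | m0
    · have hxs : xs = [] := (PySem.List.max?_eq_none_iff xs key).mp h0
      subst hxs
      rw [h0] at h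
      simp at h
      subst h
      simp [PySem.List.sorted, PySem.List.insertBy]
    · rw [h0] at h
      simp at h
      have hsnoc : PySem.List.sorted (xs ++ [x]) key true =
          PySem.List.insertBy (fun a b => decide (key b < key a)) x (PySem.List.sorted xs key true) := by
        rw [PySem.List.sorted_rev_eq_foldl_insertBy, PySem.List.sorted_rev_eq_foldl_insertBy,
          List.foldl_append]
        simp
      rcases hs : PySem.List.sorted xs key true with _ | ⟨hd, tl⟩
      · exact absurd ((PySem.List.sorted_eq_nil_iff xs key true).mp hs)
          (by rintro rfl; simp [PySem.List.max?] at h0)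
      · have hhd : hd = m0 := by
          have := ih m0 h0
          rw [hs] at this
          simpa using this
        subst hhd
        rw [← h, hsnoc, hs, PySem.List.insertBy]
        by_cases hlt : key hd < key x
        · simp [hlt]
        · simp [hlt]

-- the two loop bodies agree on every state and frame
theorem pv_step_eq (st : List String × PySem.Dict String Int) (scores : List (String × Int)) :
    pvStepA st scores = pvStepB st scores := by
  simp only [pvStepA, pvStepB]
  rcases hM : PySem.List.max? (PySem.Dict.ofList scores).values (fun v => v) with _ | M
  · -- empty dict: both take the (unreachable under Pre_) 'null' branch
    have hitems : (PySem.Dict.ofList scores).items = [] := by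
      have := (PySem.List.max?_eq_none_iff _ _).mp hM
      simpa [PySem.Dict.values] using this
    have hM2 : PySem.List.max2? (PySem.Dict.ofList scores).items (fun kv => kv.2)
        (fun kv => st.2.getD kv.1 0) = none := by
      rw [hitems]; rfl
    rw [hM2]
  · obtain ⟨m, hm2, hmk, hmf⟩ :=
      pv_max2?_char (PySem.Dict.ofList scores).items (fun kv => kv.2)
        (fun kv => st.2.getD kv.1 0) M hM
    rw [hm2]
    -- A's candidate list and its first frequency-argmax
    have hcand : PySem.List.max?
        (((PySem.Dict.ofList scores).items.filter (fun kv => kv.2 == M)).map (fun kv => kv.1))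
        (fun c => st.2.getD c 0) = some m.1 := by
      rw [pv_max?_map, hmf]
      rfl
    have hbest :
        (if 1 < (((PySem.Dict.ofList scores).items.filter (fun kv => kv.2 == M)).map (fun kv => kv.1)).length then
          (PySem.List.sorted (((PySem.Dict.ofList scores).items.filter (fun kv => kv.2 == M)).map (fun kv => kv.1))
            (fun x => st.2.getD x 0) true).headD "null"
        else (((PySem.Dict.ofList scores).items.filter (fun kv => kv.2 == M)).map (fun kv => kv.1)).headD "null") = m.1 := by
      set cands := ((PySem.Dict.ofList scores).items.filter (fun kv => kv.2 == M)).map (fun kv => kv.1) with hc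
      by_cases hlen : 1 < cands.length
      · simp only [hlen, if_true]
        exact pv_head_sorted_rev cands (fun x => st.2.getD x 0) m.1 "null" hcand
      · rcases hcs : cands with _ | ⟨c, cs⟩
        · rw [hcs] at hcand
          simp [PySem.List.max?] at hcand
        · rcases cs with _ | ⟨c2, cs2⟩
          · rw [hcs] at hcand
            simp [PySem.List.max?] at hcand
            simp [hcand]
          · rw [hcs] at hlen
            simp at hlen
    dsimp only
    rw [hbest, pv_freq_update]

-- ===== VERDICT (by name: the statement is the Claim_ definition above) =====
theorem find_matching_chord_spec : Claim_equal_find_matching_chord := by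
  intro l _ _
  unfold Spec_find_matching_chord find_matching_chord find_matching_chord_alt
  rw [funext fun st => funext fun scores => pv_step_eq st scores]
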